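-- pv_equiv track=rewrite | github.com/gladklo/bachelorThesis | Skripts/extract_tables.py | find_setext_section
-- ===== SOURCE A (Python) =====
-- from typing import List, Tuple, Optional
--
-- def normalize_heading_name(line: str) -> str:
--     # Entfernt führende/folgende Spaces und Sternchen, lowercased
--     return line.strip().strip('*').strip().lower()
--
-- def is_setext_underline(line: str) -> bool:
--     s = line.strip()
--     return len(s) > 0 and set(s) == {'='}
--
-- def find_setext_section(lines: List[str], target_name: str) -> Optional[Tuple[int, int]]:
--     """
--     Findet eine Setext-Section:
--         **Name**
--         ========
--         (Inhalt...)
--     und gibt (start_index, end_index_excl) zurück,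
--     wobei start_index auf der Namens-Zeile liegt und end_index_excl
--     die erste Zeile der *nächsten* Setext-Section (oder len(lines)) ist.
--     """
--     # alle Kandidaten im Text finden (erste passende nehmen)
--     starts = []
--     for i in range(len(lines) - 1):
--         if normalize_heading_name(lines[i]) == target_name and is_setext_underline(lines[i + 1]):
--             starts.append(i)
--     if not starts:
--         return None
--
--     start = starts[0]
--     # Ende: nächste Setext-Überschrift (beliebiger Name)
--     j = start + 2
--     while j < len(lines) - 1:
--         if is_setext_underline(lines[j + 1]):
--             # j ist Zeile mit neuem Namen, j+1 ist =====
--             break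
--         j += 1
--     end = j if j < len(lines) - 1 else len(lines)
--     return (start, end)
-- ===== SOURCE B (Python) =====
-- def normalize_heading_name(line: str) -> str:
--     return line.strip().strip('*').strip().lower()
--
-- def is_setext_underline(line: str) -> bool:
--     s = line.strip()
--     return len(s) > 0 and set(s) == {'='}
--
-- def find_setext_section(lines, target_name):
--     n = len(lines)
--     # one scan: positions p whose next line is a setext underline
--     underlines = [p for p in range(n - 1) if is_setext_underline(lines[p + 1])]
--     start = next((p for p in underlines if normalize_heading_name(lines[p]) == target_name), None)
--     if start is None:
--         return None
--     end = next((p for p in underlines if p >= start + 2), n)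
--     return (start, end)
-- ===== Notes on version B (the rewrite author's own statement) =====
-- stated objective: alternative
-- what changed: Replaces A's append-all-candidates loop plus an imperative while-scan for the section end by a single pass that builds the index of all setext-underline positions once, then takes the first name-matching position as start and the first indexed position >= start+2 as end.
import Mathlib
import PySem

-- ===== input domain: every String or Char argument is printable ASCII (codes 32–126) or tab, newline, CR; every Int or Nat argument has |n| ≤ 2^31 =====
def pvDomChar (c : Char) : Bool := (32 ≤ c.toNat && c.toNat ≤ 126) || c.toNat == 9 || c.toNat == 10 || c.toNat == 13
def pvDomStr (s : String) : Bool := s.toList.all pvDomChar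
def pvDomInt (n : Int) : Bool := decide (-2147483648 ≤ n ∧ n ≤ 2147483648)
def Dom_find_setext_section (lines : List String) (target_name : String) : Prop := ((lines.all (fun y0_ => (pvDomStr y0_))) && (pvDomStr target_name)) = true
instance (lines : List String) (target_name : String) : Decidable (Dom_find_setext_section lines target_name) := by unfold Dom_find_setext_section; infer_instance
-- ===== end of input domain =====

-- B replaces A's candidate-collecting loop and imperative while-scan by one underline-position
-- index scanned twice with find-first; alternative decomposition, same asymptotic cost.

-- shared module helpers (identical in Source A and Source B)
def normalizeHeading (line : String) : String :=
  PySem.Str.lower (PySem.Str.strip (PySem.Str.stripChars (PySem.Str.strip line) "*"))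

def isUnderline (line : String) : Bool :=
  let s := PySem.Str.strip line
  decide (0 < PySem.Str.len s) && PySem.Set.equal (PySem.Set.ofList s.toList) (PySem.Set.ofList ['='])

-- ===== PORT A =====
-- the while loop: j from start+2 while j < len-1, break on underline at j+1; end = j if j < len-1 else len
def findEndA (lines : List String) (j : Int) : Int :=
  if j < (lines.length : Int) - 1 then
    if isUnderline (PySem.List.pyGetD lines (j + 1) "") then j
    else findEndA lines (j + 1)
  else (lines.length : Int)
termination_by ((lines.length : Int) - 1 - j).toNat
decreasing_by omega

def find_setext_section (lines : List String) (target_name : String) : Option (Int × Int) :=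
  let starts : List Int := (PySem.List.pyRange 0 ((lines.length : Int) - 1) 1).foldl
    (fun acc i =>
      if normalizeHeading (PySem.List.pyGetD lines i "") == target_name
          && isUnderline (PySem.List.pyGetD lines (i + 1) "") then acc ++ [i] else acc) []
  match starts with
  | [] => none
  | start :: _ => some (start, findEndA lines (start + 2))

-- ===== PORT B =====
def find_setext_section_alt (lines : List String) (target_name : String) : Option (Int × Int) :=
  let n : Int := (lines.length : Int)
  let underlines : List Int :=
    (PySem.List.pyRange 0 (n - 1) 1).filter (fun p => isUnderline (PySem.List.pyGetD lines (p + 1) ""))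
  match underlines.find? (fun p => normalizeHeading (PySem.List.pyGetD lines p "") == target_name) with
  | none => none
  | some start => some (start, (underlines.find? (fun p => start + 2 ≤ p)).getD n)

-- ===== PRECONDITION & SPEC =====
def Spec_find_setext_section (lines : List String) (target_name : String) (out : Option (Int × Int)) : Prop := out = find_setext_section_alt lines target_name
instance (lines : List String) (target_name : String) (out : Option (Int × Int)) : Decidable (Spec_find_setext_section lines target_name out) := by unfold Spec_find_setext_section; infer_instance

-- ===== CLAIM (what is proved, stated in full; the proofs are below) =====
def Claim_equal_find_setext_section : Prop := ∀ (lines : List String) (target_name : String), Dom_find_setext_section lines target_name → Spec_find_setext_section lines target_name (find_setext_section lines target_name)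

-- ===== LEMMAS AND PROOFS =====

-- first element ≥ j of a strictly increasing list containing j is j itself
theorem find?_ge_of_mem (L : List Int) (j : Int) (hs : L.Pairwise (· < ·)) (hj : j ∈ L) :
    L.find? (fun x => decide (j ≤ x)) = some j := by
  induction L with
  | nil => simp at hj
  | cons h t ih =>
    rcases List.mem_cons.mp hj with rfl | hmem
    · simp
    · have hlt : h < j := (List.pairwise_cons.mp hs).1 j hmem
      rw [List.find?_cons_of_neg (by simp; omega)]
      exact ih (List.pairwise_cons.mp hs).2 hmem

-- if j is not in L, the first element ≥ j is the first element ≥ j+1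
theorem find?_ge_succ (L : List Int) (j : Int) (hj : j ∉ L) :
    L.find? (fun x => decide (j ≤ x)) = L.find? (fun x => decide (j + 1 ≤ x)) := by
  induction L with
  | nil => rfl
  | cons h t ih =>
    have hne : h ≠ j := fun e => hj (e ▸ List.mem_cons_self ..)
    by_cases hle : j + 1 ≤ h
    · rw [List.find?_cons_of_pos (by simp; omega), List.find?_cons_of_pos (by simpa)]
    · rw [List.find?_cons_of_neg (by simp; omega), List.find?_cons_of_neg (by simp; omega)]
      exact ih (fun hm => hj (List.mem_cons_of_mem _ hm))

theorem findEndA_eq (lines : List String) (j : Int) (hj : 0 ≤ j) :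
    findEndA lines j =
      (((PySem.List.pyRange 0 ((lines.length : Int) - 1) 1).filter
          (fun p => isUnderline (PySem.List.pyGetD lines (p + 1) ""))).find?
        (fun p => decide (j ≤ p))).getD (lines.length : Int) := by
  revert hj
  induction j using findEndA.induct (lines := lines) with
  | case1 j hlt hu =>
    intro hj
    have hp : (List.filter (fun p => isUnderline (PySem.List.pyGetD lines (p + 1) ""))
        (PySem.List.pyRange 0 ((lines.length : Int) - 1) 1)).Pairwise (· < ·) :=
      (PySem.List.pairwise_lt_pyRange_one 0 _).filter _
    have hmem : j ∈ List.filter (fun p => isUnderline (PySem.List.pyGetD lines (p + 1) ""))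
        (PySem.List.pyRange 0 ((lines.length : Int) - 1) 1) :=
      List.mem_filter.mpr ⟨PySem.List.mem_pyRange_one.mpr ⟨hj, hlt⟩, hu⟩
    rw [findEndA, if_pos hlt, if_pos hu, find?_ge_of_mem _ _ hp hmem]
    rfl
  | case2 j hlt hu ih =>
    intro hj
    rw [findEndA, if_pos hlt, if_neg hu]
    rw [ih (by omega)]
    congr 1
    refine (find?_ge_succ _ j (fun hm => ?_)).symm
    exact hu (List.mem_filter.mp hm).2
  | case3 j hlt =>
    intro hj
    rw [findEndA, if_neg hlt]
    rw [List.find?_eq_none.mpr ?_]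
    · rfl
    · intro x hx
      have := PySem.List.mem_pyRange_one.mp (List.mem_filter.mp hx).1
      simp; omega

theorem find_setext_section_spec : Claim_equal_find_setext_section := by
  intro lines target _
  unfold Spec_find_setext_section
  simp only [find_setext_section, find_setext_section_alt]
  rw [PySem.List.foldl_append_if_eq_filter, List.nil_append, List.find?_filter]
  have hpred : (fun a : Int => decide (isUnderline (PySem.List.pyGetD lines (a + 1) "") = true
        ∧ (normalizeHeading (PySem.List.pyGetD lines a "") == target) = true))
      = (fun i : Int => normalizeHeading (PySem.List.pyGetD lines i "") == target
        && isUnderline (PySem.List.pyGetD lines (i + 1) "")) := by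
    funext a; simp [Bool.and_comm, Bool.beq_eq_decide_eq]
  rw [hpred, ← List.head?_filter]
  cases hfp : List.filter (fun i : Int => normalizeHeading (PySem.List.pyGetD lines i "") == target
      && isUnderline (PySem.List.pyGetD lines (i + 1) ""))
      (PySem.List.pyRange 0 ((lines.length : Int) - 1) 1) with
  | nil => simp
  | cons s t =>
    have hs : 0 ≤ s := by
      have : s ∈ PySem.List.pyRange 0 ((lines.length : Int) - 1) 1 :=
        (List.mem_filter.mp (hfp ▸ List.mem_cons_self ..)).1
      exact (PySem.List.mem_pyRange_one.mp this).1
    simp only [List.head?_cons, Option.some.injEq, Prod.mk.injEq, true_and]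
    rw [findEndA_eq lines (s + 2) (by omega)]
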